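-- pv_equiv track=rewrite | github.com/AgeOfAlgorithms/Algo-s-CTF-Writeups | retired/A Maze of Twisty Little Passages, All Different/parse_telemetry.py | visualize_path
-- ===== SOURCE A (Python) =====
-- def visualize_path(path, sector_num):
--     """Visualize a path as ASCII art."""
--     if not path:
--         return ""
--
--     xs = [p[0] for p in path]
--     ys = [p[1] for p in path]
--
--     min_x, max_x = min(xs), max(xs)
--     min_y, max_y = min(ys), max(ys)
--
--     # Create grid
--     width = max_x - min_x + 1
--     height = max_y - min_y + 1
--     grid = [[' ' for _ in range(width)] for _ in range(height)]
--
--     # Mark path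
--     for x, y in path:
--         grid_y = max_y - y  # Flip y-axis for display
--         grid_x = x - min_x
--         grid[grid_y][grid_x] = '#'
--
--     # Convert to string
--     result = f"Sector {sector_num}:\n"
--     result += '\n'.join([''.join(row) for row in grid])
--     return result
-- ===== SOURCE B (Python) =====
-- def visualize_path(path, sector_num):
--     """Visualize a path as ASCII art."""
--     if not path:
--         return ""
--
--     xs = [p[0] for p in path]
--     ys = [p[1] for p in path]
--
--     min_x, max_x = min(xs), max(xs)
--     min_y, max_y = min(ys), max(ys)
--
--     width = max_x - min_x + 1
--     height = max_y - min_y + 1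
--
--     # No 2D grid: a set of display coordinates, rendered by direct lookup.
--     marked = {(x - min_x, max_y - y) for (x, y) in path}
--     rows = (''.join('#' if (gx, gy) in marked else ' ' for gx in range(width))
--             for gy in range(height))
--     return f"Sector {sector_num}:\n" + '\n'.join(rows)
-- ===== Notes on version B (the rewrite author's own statement) =====
-- stated objective: simpler
-- what changed: Replaces the allocate-then-mutate 2D grid (fill with spaces, then overwrite cells in a second pass) by a single set of display coordinates rendered in one lookup-driven pass per row, with no mutable grid at all.
import Mathlib
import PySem

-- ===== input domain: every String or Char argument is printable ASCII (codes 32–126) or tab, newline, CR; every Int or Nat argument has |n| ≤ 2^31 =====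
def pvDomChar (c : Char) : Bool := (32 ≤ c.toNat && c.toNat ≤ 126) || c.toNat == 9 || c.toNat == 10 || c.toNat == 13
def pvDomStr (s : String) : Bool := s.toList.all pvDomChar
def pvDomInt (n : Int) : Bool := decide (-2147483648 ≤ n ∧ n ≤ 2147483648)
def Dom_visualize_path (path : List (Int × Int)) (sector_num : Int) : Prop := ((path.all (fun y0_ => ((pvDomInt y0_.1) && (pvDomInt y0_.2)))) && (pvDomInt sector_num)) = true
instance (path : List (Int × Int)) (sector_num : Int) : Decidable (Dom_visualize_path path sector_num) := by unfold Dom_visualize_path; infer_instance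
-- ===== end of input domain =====

-- B replaces A's fill-then-mutate 2D grid with a set of display coordinates rendered by direct lookup (simpler; same cost).


-- ===== PORT A =====
-- shared helper: Python's min(xs)/max(xs); the lists here are never empty, so the .getD default is unreachable
def pvMinInt (xs : List Int) : Int := (PySem.List.min? xs (fun v => v)).getD 0
def pvMaxInt (xs : List Int) : Int := (PySem.List.max? xs (fun v => v)).getD 0

-- grid[max_y - y][x - min_x] = '#'  (Python in-place assignment on the nested list)
def pvMark (max_y min_x : Int) (g : List (List Char)) (p : Int × Int) : List (List Char) :=
  PySem.List.pySetD g (max_y - p.2)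
    (PySem.List.pySetD (PySem.List.pyGetD g (max_y - p.2) []) (p.1 - min_x) '#')

def visualize_path (path : List (Int × Int)) (sector_num : Int) : String :=
  if path.isEmpty then "" else
    let xs := path.map (·.1)
    let ys := path.map (·.2)
    let min_x := pvMinInt xs
    let max_x := pvMaxInt xs
    let min_y := pvMinInt ys
    let max_y := pvMaxInt ys
    let width := max_x - min_x + 1
    let height := max_y - min_y + 1
    let grid := List.replicate height.toNat (List.replicate width.toNat ' ')
    let grid := path.foldl (pvMark max_y min_x) grid
    "Sector " ++ PySem.Int.toStr sector_num ++ ":\n" ++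
      PySem.Str.join "\n" (grid.map (fun row => String.mk row))

-- ===== PORT B =====
-- ''.join('#' if (gx, gy) in marked else ' ' for gx in range(width))
def pvRowStr (marked : PySem.Set (Int × Int)) (width : Int) (gy : Int) : String :=
  String.mk ((PySem.List.pyRange 0 width 1).map
    (fun gx => if PySem.Set.contains marked (gx, gy) then '#' else ' '))

def visualize_path_alt (path : List (Int × Int)) (sector_num : Int) : String :=
  if path.isEmpty then "" else
    let xs := path.map (·.1)
    let ys := path.map (·.2)
    let min_x := pvMinInt xs
    let max_x := pvMaxInt xs
    let min_y := pvMinInt ys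
    let max_y := pvMaxInt ys
    let width := max_x - min_x + 1
    let height := max_y - min_y + 1
    let marked : PySem.Set (Int × Int) :=
      PySem.Set.ofList (path.map (fun p => (p.1 - min_x, max_y - p.2)))
    "Sector " ++ PySem.Int.toStr sector_num ++ ":\n" ++
      PySem.Str.join "\n" ((PySem.List.pyRange 0 height 1).map (pvRowStr marked width))

-- ===== PRECONDITION & SPEC =====
def Spec_visualize_path (path : List (Int × Int)) (sector_num : Int) (out : String) : Prop := out = visualize_path_alt path sector_num
instance (path : List (Int × Int)) (sector_num : Int) (out : String) : Decidable (Spec_visualize_path path sector_num out) := by unfold Spec_visualize_path; infer_instance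

-- ===== CLAIM (what is proved, stated in full; the proofs are below) =====
def Claim_equal_visualize_path : Prop := ∀ (path : List (Int × Int)) (sector_num : Int), Dom_visualize_path path sector_num → Spec_visualize_path path sector_num (visualize_path path sector_num)

-- ===== LEMMAS AND PROOFS =====

-- min(xs)/max(xs) bound every element of a nonempty list
lemma pvMin_le (xs : List Int) (hne : xs ≠ []) : ∀ x ∈ xs, pvMinInt xs ≤ x := by
  intro x hx
  unfold pvMinInt
  cases h : PySem.List.min? xs (fun v => v) with
  | none => rw [PySem.List.min?_eq_none_iff] at h; exact absurd h hne
  | some m => simpa using PySem.List.min?_isMin h x hx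

lemma pvLe_max (xs : List Int) (hne : xs ≠ []) : ∀ x ∈ xs, x ≤ pvMaxInt xs := by
  intro x hx
  unfold pvMaxInt
  cases h : PySem.List.max? xs (fun v => v) with
  | none => rw [PySem.List.max?_eq_none_iff] at h; exact absurd h hne
  | some m => simpa using PySem.List.max?_isMax h x hx

-- one Python assignment grid[gy][gx] = '#', under in-range indices, is List.set
lemma pvMark_step (max_y min_x : Int) (g : List (List Char)) (p : Int × Int)
    (h1 : 0 ≤ max_y - p.2) (h2 : max_y - p.2 < (g.length : Int))
    (h3 : 0 ≤ p.1 - min_x) :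
    pvMark max_y min_x g p =
      g.set (max_y - p.2).toNat ((g[(max_y - p.2).toNat]'(by omega)).set (p.1 - min_x).toNat '#') := by
  unfold pvMark
  rw [PySem.List.pyGetD_eq_getElem g [] h1 h2,
      PySem.List.pySetD_of_nonneg _ _ h3,
      PySem.List.pySetD_of_nonneg _ _ h1]

-- the grid after the marking loop, cell by cell
lemma pvMark_foldl_spec (max_y min_x : Int) (W : Nat) (l : List (Int × Int)) :
    ∀ (g : List (List Char)),
    (∀ p ∈ l, 0 ≤ max_y - p.2 ∧ max_y - p.2 < (g.length : Int) ∧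
              0 ≤ p.1 - min_x ∧ p.1 - min_x < (W : Int)) →
    (∀ row ∈ g, row.length = W) →
    (l.foldl (pvMark max_y min_x) g).length = g.length ∧
    (∀ row ∈ l.foldl (pvMark max_y min_x) g, row.length = W) ∧
    (∀ gy gx : Nat, gy < g.length → gx < W →
      ((l.foldl (pvMark max_y min_x) g).getD gy []).getD gx ' ' =
        if l.any (fun p => decide (max_y - p.2 = (gy : Int) ∧ p.1 - min_x = (gx : Int)))
        then '#' else (g.getD gy []).getD gx ' ') := by
  induction l with
  | nil => intro g _ hrow; exact ⟨rfl, hrow, by intro gy gx _ _; simp⟩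
  | cons p l ih =>
    intro g hb hrow
    obtain ⟨h1, h2, h3, h4⟩ := hb p (List.mem_cons_self ..)
    have ha : (max_y - p.2).toNat < g.length := by omega
    have hstep := pvMark_step max_y min_x g p h1 h2 h3
    have hlen' : (pvMark max_y min_x g p).length = g.length := by
      rw [hstep]; simp
    have hrow' : ∀ row ∈ pvMark max_y min_x g p, row.length = W := by
      rw [hstep]; intro row hr
      rcases List.mem_or_eq_of_mem_set hr with h | h
      · exact hrow _ h
      · subst h; simp [hrow _ (List.getElem_mem _)]
    have hb' : ∀ q ∈ l, 0 ≤ max_y - q.2 ∧ max_y - q.2 < ((pvMark max_y min_x g p).length : Int) ∧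
        0 ≤ q.1 - min_x ∧ q.1 - min_x < (W : Int) := by
      intro q hq; rw [hlen']; exact hb q (List.mem_cons_of_mem _ hq)
    obtain ⟨ihlen, ihrow, ihget⟩ := ih (pvMark max_y min_x g p) hb' hrow'
    refine ⟨by rw [List.foldl_cons, ihlen, hlen'], by rw [List.foldl_cons]; exact ihrow, ?_⟩
    intro gy gx hgy hgx
    have hcell : ((pvMark max_y min_x g p).getD gy []).getD gx ' ' =
        if (max_y - p.2 = (gy : Int) ∧ p.1 - min_x = (gx : Int)) then '#'
        else (g.getD gy []).getD gx ' ' := by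
      rw [hstep]
      rw [List.getD_eq_getElem (g.set (max_y - p.2).toNat _) [] (by simpa using hgy)]
      rw [List.getElem_set]
      by_cases hy : (max_y - p.2).toNat = gy
      · subst hy
        have hy' : max_y - p.2 = (((max_y - p.2).toNat : Nat) : Int) := by omega
        have hrl : (g[(max_y - p.2).toNat]'ha).length = W := hrow _ (List.getElem_mem _)
        rw [if_pos rfl]
        rw [List.getD_eq_getElem _ ' ' (by simpa [hrl] using hgx)]
        rw [List.getElem_set]
        by_cases hx : (p.1 - min_x).toNat = gx
        · have hx' : p.1 - min_x = (gx : Int) := by omega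
          simp [← hy', hx']
        · have hx' : ¬ (p.1 - min_x = (gx : Int)) := by omega
          rw [if_neg hx, if_neg (by tauto)]
          rw [List.getD_eq_getElem g [] hgy]
          rw [List.getD_eq_getElem _ ' ' (by
            simpa [hrow _ (List.getElem_mem _)] using hgx)]
      · have hy' : ¬ (max_y - p.2 = (gy : Int)) := by omega
        rw [if_neg hy, if_neg (by tauto)]
        rw [List.getD_eq_getElem g [] hgy]
    rw [List.foldl_cons, ihget gy gx (by rw [hlen']; exact hgy) hgx, hcell]
    simp only [List.any_cons]
    by_cases hl : l.any (fun p => decide (max_y - p.2 = (gy : Int) ∧ p.1 - min_x = (gx : Int))) = true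
    · rw [if_pos hl, if_pos (by rw [hl, Bool.or_true])]
    · rw [if_neg hl]
      by_cases hp : (max_y - p.2 = (gy : Int) ∧ p.1 - min_x = (gx : Int))
      · rw [if_pos hp, if_pos (by rw [decide_eq_true hp, Bool.true_or])]
      · rw [if_neg hp, if_neg (by rw [decide_eq_false hp, Bool.false_or]; exact hl)]

-- the two row lists agree: A's mutated grid, row by row, is B's lookup-rendered rows
lemma pvRows_eq (path : List (Int × Int)) (hne : path ≠ []) :
    ((path.foldl (pvMark (pvMaxInt (path.map (·.2))) (pvMinInt (path.map (·.1))))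
      (List.replicate (pvMaxInt (path.map (·.2)) - pvMinInt (path.map (·.2)) + 1).toNat
        (List.replicate (pvMaxInt (path.map (·.1)) - pvMinInt (path.map (·.1)) + 1).toNat ' '))).map
      (fun row => String.mk row))
    = (PySem.List.pyRange 0 (pvMaxInt (path.map (·.2)) - pvMinInt (path.map (·.2)) + 1) 1).map
        (pvRowStr
          (PySem.Set.ofList (path.map (fun p =>
            (p.1 - pvMinInt (path.map (·.1)), pvMaxInt (path.map (·.2)) - p.2))))
          (pvMaxInt (path.map (·.1)) - pvMinInt (path.map (·.1)) + 1)) := by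
  set mx := pvMinInt (path.map (·.1)) with hmx
  set Mx := pvMaxInt (path.map (·.1)) with hMx
  set my := pvMinInt (path.map (·.2)) with hmy
  set My := pvMaxInt (path.map (·.2)) with hMy
  set marked := PySem.Set.ofList (path.map (fun p => (p.1 - mx, My - p.2))) with hmarked
  have hxne : path.map (·.1) ≠ [] := by simpa using hne
  have hyne : path.map (·.2) ≠ [] := by simpa using hne
  have hbx : ∀ p ∈ path, mx ≤ p.1 ∧ p.1 ≤ Mx := fun p hp =>
    ⟨pvMin_le _ hxne _ (List.mem_map_of_mem hp), pvLe_max _ hxne _ (List.mem_map_of_mem hp)⟩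
  have hby : ∀ p ∈ path, my ≤ p.2 ∧ p.2 ≤ My := fun p hp =>
    ⟨pvMin_le _ hyne _ (List.mem_map_of_mem hp), pvLe_max _ hyne _ (List.mem_map_of_mem hp)⟩
  obtain ⟨p0, hp0⟩ := List.exists_mem_of_ne_nil path hne
  have hW1 : 1 ≤ Mx - mx + 1 := by have := hbx p0 hp0; omega
  have hH1 : 1 ≤ My - my + 1 := by have := hby p0 hp0; omega
  have hWc : ((Mx - mx + 1).toNat : Int) = Mx - mx + 1 := by omega
  have hHc : ((My - my + 1).toNat : Int) = My - my + 1 := by omega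
  set W := (Mx - mx + 1).toNat with hWdef
  set H := (My - my + 1).toNat with hHdef
  set g0 : List (List Char) := List.replicate H (List.replicate W ' ') with hg0
  have hg0len : g0.length = H := by simp [hg0]
  have hg0row : ∀ row ∈ g0, row.length = W := by
    intro row hr; rw [List.eq_of_mem_replicate hr]; simp
  have hb : ∀ p ∈ path, 0 ≤ My - p.2 ∧ My - p.2 < (g0.length : Int) ∧
      0 ≤ p.1 - mx ∧ p.1 - mx < (W : Int) := by
    intro p hp
    have h1 := hbx p hp; have h2 := hby p hp
    rw [hg0len]
    refine ⟨by omega, by omega, by omega, by omega⟩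
  obtain ⟨Glen, Grow, Gget⟩ := pvMark_foldl_spec My mx W path g0 hb hg0row
  set G := path.foldl (pvMark My mx) g0 with hG
  rw [PySem.List.pyRange_one]
  apply List.ext_getElem
  · simp [Glen, hg0len]; omega
  · intro i hi hi'
    have hiH : i < H := by simpa [Glen, hg0len] using hi
    rw [List.getElem_map, List.getElem_map, List.getElem_map, List.getElem_range]
    unfold pvRowStr
    rw [PySem.List.pyRange_one]
    congr 1
    apply List.ext_getElem
    · have := Grow _ (List.getElem_mem (by simpa [Glen, hg0len] using hiH))
      simp [this]; omega
    · intro j hj hj'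
      have hjW : j < W := by
        have := Grow _ (List.getElem_mem (by simpa [Glen, hg0len] using hiH))
        simpa [this] using hj
      rw [List.getElem_map, List.getElem_map, List.getElem_range]
      have hGi : G[i]'(by simpa [Glen, hg0len] using hiH) = G.getD i [] := by
        rw [List.getD_eq_getElem G [] (by simpa [Glen, hg0len] using hiH)]
      have hcell := Gget i j (by simpa [hg0len] using hiH) hjW
      have hGij : (G[i]'(by simpa [Glen, hg0len] using hiH))[j]'hj =
          (G.getD i []).getD j ' ' := by
        rw [← hGi, List.getD_eq_getElem _ ' ' (by simpa [hGi] using hj)]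
      rw [hGij, hcell]
      have hg0get : (g0.getD i []).getD j ' ' = ' ' := by
        rw [List.getD_eq_getElem g0 [] (by rw [hg0len]; exact hiH)]
        simp [hg0]
      have hbools : (path.any fun p => decide (My - p.2 = (i : Int) ∧ p.1 - mx = (j : Int))) =
          PySem.Set.contains marked ((0 : Int) + (j : Nat), (0 : Int) + (i : Nat)) := by
        by_cases hm : ∃ p ∈ path, My - p.2 = (i : Int) ∧ p.1 - mx = (j : Int)
        · obtain ⟨p, hp, hpy, hpx⟩ := hm
          have h1 : (path.any fun p => decide (My - p.2 = (i : Int) ∧ p.1 - mx = (j : Int))) = true := by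
            simp only [List.any_eq_true]; exact ⟨p, hp, by simp [hpy, hpx]⟩
          have h2 : PySem.Set.contains marked ((0 : Int) + (j : Nat), (0 : Int) + (i : Nat)) = true := by
            rw [PySem.Set.contains_iff, hmarked, PySem.Set.mem_ofList]
            exact List.mem_map.mpr ⟨p, hp, by simp [hpx, hpy]⟩
          rw [h1, h2]
        · have h1 : (path.any fun p => decide (My - p.2 = (i : Int) ∧ p.1 - mx = (j : Int))) = false := by
            simp only [List.any_eq_false]; intro p hp
            simp only [decide_eq_true_eq]; exact fun hc => hm ⟨p, hp, hc⟩
          have h2 : PySem.Set.contains marked ((0 : Int) + (j : Nat), (0 : Int) + (i : Nat)) = false := by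
            rw [Bool.eq_false_iff]
            intro hc
            rw [PySem.Set.contains_iff, hmarked, PySem.Set.mem_ofList] at hc
            obtain ⟨p, hp, hpe⟩ := List.mem_map.mp hc
            apply hm
            refine ⟨p, hp, ?_, ?_⟩ <;> (simp at hpe; omega)
          rw [h1, h2]
      rw [hbools, hg0get]

-- ===== VERDICT (by name: the statement is the Claim_ definition above) =====
theorem visualize_path_spec : Claim_equal_visualize_path := by
  intro path sector_num _dom
  unfold Spec_visualize_path visualize_path visualize_path_alt
  by_cases hp : path.isEmpty
  · simp [hp]
  · have hne : path ≠ [] := by simpa using hp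
    simp only [hp, Bool.false_eq_true, if_false]
    rw [pvRows_eq path hne]
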